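-- pv_equiv track=rewrite | github.com/wyk18703232953/myResearch | codeComplex/data/filteredData/python/np/python_np_0523.py | solve
-- ===== SOURCE A (Python) =====
-- def solve(n, k, s):
--     # original judge() function, adapted to Python string `s`
--     def judge(needed):
--         inf = 2147483647
--         minstate = [inf] * (1 << k)
--         minstate[0] = 0
--
--         effect = [[inf] * (n + 1) for _ in range(k)]
--
--         # precompute for each character j and position i the earliest index
--         # where a segment of length `needed` ending at/after i is possible
--         for j in range(k):
--             accu = 0
--             index = inf
--             for i in range(n - 1, -1, -1):
--                 if s[i] == '?' or s[i] == chr(97 + j):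
--                     accu += 1
--                 else:
--                     accu = 0
--
--                 if accu >= needed:
--                     index = i + needed
--                 effect[j][i] = index
--
--         # DP over subsets of characters
--         for state in range(1, 1 << k):
--             minimum = minstate[state]
--             for j in range(k):
--                 if (1 << j) & state == 0:
--                     continue
--                 index = minstate[state ^ (1 << j)]
--                 if index < n:
--                     minimum = min(minimum, effect[j][index])
--             minstate[state] = minimum
--
--         return minstate[-1] <= n
--
--     # binary search maximum feasible `needed`
--     front = 0
--     rear = n // k + 1
--     while front < rear:
--         mid = (front + rear) // 2
--         if judge(mid):
--             front = mid + 1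
--         else:
--             rear = mid
--     return front - 1
-- ===== SOURCE B (Python) =====
-- def solve(n, k, s):
--     inf = 2147483647
--
--     def judge(needed):
--         # per-character precompute: earliest end of a length-`needed` block at/after each position
--         effect = []
--         for j in range(k):
--             row = [inf] * (n + 1)
--             accu = 0
--             index = inf
--             for i in range(n - 1, -1, -1):
--                 if s[i] == '?' or s[i] == chr(97 + j):
--                     accu += 1
--                 else:
--                     accu = 0
--                 if accu >= needed:
--                     index = i + needed
--                 row[i] = index
--             effect.append(row)
--
--         # memoized recursion over character subsets instead of the ascending DP loop
--         memo = {}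
--
--         def best(state):
--             if state == 0:
--                 return 0
--             if state in memo:
--                 return memo[state]
--             m = inf
--             for j in range(k):
--                 if state & (1 << j) == 0:
--                     continue
--                 sub = best(state ^ (1 << j))
--                 if sub < n:
--                     m = min(m, effect[j][sub])
--             memo[state] = m
--             return m
--
--         return best((1 << k) - 1) <= n
--
--     # binary search, written recursively
--     def search(front, rear):
--         if not front < rear:
--             return front - 1
--         mid = (front + rear) // 2
--         if judge(mid):
--             return search(mid + 1, rear)
--         else:
--             return search(front, mid)
--
--     return search(0, n // k + 1)
-- ===== Notes on version B (the rewrite author's own statement) =====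
-- stated objective: alternative
-- what changed: The ascending-order iterative subset-DP array is replaced by a memoized top-down recursion over bitmasks (best(state) recursing on cleared bits with a dict cache), and the binary-search while-loop is written as a recursive function; the per-character run-length precompute is kept.
import Mathlib
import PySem

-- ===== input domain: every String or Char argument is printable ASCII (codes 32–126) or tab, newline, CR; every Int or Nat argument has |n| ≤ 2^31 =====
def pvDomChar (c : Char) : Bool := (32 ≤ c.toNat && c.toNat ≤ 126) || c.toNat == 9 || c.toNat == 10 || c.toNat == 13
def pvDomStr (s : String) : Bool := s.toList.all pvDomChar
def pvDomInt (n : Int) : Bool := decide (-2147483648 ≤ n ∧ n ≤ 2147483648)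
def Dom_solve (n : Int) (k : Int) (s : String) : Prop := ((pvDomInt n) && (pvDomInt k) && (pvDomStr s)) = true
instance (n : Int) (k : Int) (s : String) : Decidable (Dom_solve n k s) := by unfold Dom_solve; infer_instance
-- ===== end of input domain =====

-- B changes the subset DP into a memoized recursion over bitmasks and writes the binary search
-- recursively; same asymptotic cost (objective: alternative).

def pvInf : Int := 2147483647

-- the per-character precompute loop; this loop is textually identical in Source A and Source B, so both
-- ports share this one transliteration of it (descending i-loop over range(n-1,-1,-1), state
-- (accu, index), row[i] = index).  chr(97+j) is ported as Char.ofNat; under Dom_solve every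
-- character of s has code ≤ 126, so the comparison agrees with Python for every j.
def effectRow (n : Int) (s : String) (needed : Int) (j : Int) : List Int :=
  ((PySem.List.pyRange (n - 1) (-1) (-1)).foldl
    (fun (st : Int × Int × List Int) (i : Int) =>
      let c := (PySem.Str.pyGet? s i).getD ' '   -- s[i]; in range under Pre_ (n ≤ len(s))
      let accu := if c = '?' ∨ c = Char.ofNat (97 + j).toNat then st.1 + 1 else 0
      let index := if accu ≥ needed then i + needed else st.2.1
      (accu, index, PySem.List.pySetD st.2.2 i index))
    (0, pvInf, List.replicate (n + 1).toNat pvInf)).2.2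

-- ===== PORT A =====

-- the body of A's inner DP loop over j (named so the proofs can speak about it)
def dpInner (eff : List (List Int)) (n : Int) (ms : List Int) (state : Int)
    (minimum : Int) (j : Int) : Int :=
  if (1 <<< j.toNat) &&& state.toNat = 0 then minimum
  else
    let index := PySem.List.pyGetD ms ((state.toNat ^^^ (1 <<< j.toNat) : Nat) : Int) pvInf
    if index < n then
      min minimum (PySem.List.pyGetD (PySem.List.pyGetD eff j []) index pvInf)
    else minimum

-- the body of A's outer DP loop over state
def dpStep (eff : List (List Int)) (n : Int) (k : Int) (ms : List Int) (state : Int) : List Int :=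
  let minimum := (PySem.List.pyRange 0 k 1).foldl (dpInner eff n ms state)
    (PySem.List.pyGetD ms state pvInf)
  PySem.List.pySetD ms state minimum

-- judge(needed): iterative subset DP over an array minstate[0 .. 2^k - 1], ascending states.
-- Python's `1 << k` is exact as 2 ^ k.toNat for k >= 0 (k < 0 raises, outside Pre_); the
-- nonnegative bitmask arithmetic is done on Nat (exact for the nonnegative ints involved).
def judgeA (n : Int) (k : Int) (s : String) (needed : Int) : Bool :=
  let sizeN : Nat := 2 ^ k.toNat
  let minstate : List Int := PySem.List.pySetD (List.replicate sizeN pvInf) 0 0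
  let effect : List (List Int) := (PySem.List.pyRange 0 k 1).map (fun j => effectRow n s needed j)
  let minstate := (PySem.List.pyRange 1 (sizeN : Int) 1).foldl (dpStep effect n k) minstate
  PySem.List.pyGetD minstate (-1) pvInf ≤ n

def searchA (n : Int) (k : Int) (s : String) (front : Int) (rear : Int) : Int :=
  if h : front < rear then
    let mid := PySem.Int.floordiv (front + rear) 2
    if judgeA n k s mid then searchA n k s (mid + 1) rear
    else searchA n k s front mid
  else front - 1
termination_by (rear - front).toNat
decreasing_by
  · have h1 : front ≤ PySem.Int.floordiv (front + rear) 2 :=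
      (PySem.Int.le_floordiv_iff_mul_le (by omega)).2 (by omega)
    omega
  · have h2 : PySem.Int.floordiv (front + rear) 2 < rear :=
      (PySem.Int.floordiv_lt_iff_lt_mul (by omega)).2 (by omega)
    have h1 : front ≤ PySem.Int.floordiv (front + rear) 2 :=
      (PySem.Int.le_floordiv_iff_mul_le (by omega)).2 (by omega)
    omega

def solve (n : Int) (k : Int) (s : String) : Int :=
  searchA n k s 0 (PySem.Int.floordiv n k + 1)

-- ===== PORT B =====

-- needed by the termination argument of pvBest: clearing a set bit decreases the mask
theorem pvXorLt (state j : Nat) (h : state &&& (1 <<< j) ≠ 0) :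
    state ^^^ (1 <<< j) < state := by
  have hb : state.testBit j = true := by
    by_contra hf
    simp only [Bool.not_eq_true] at hf
    have : state &&& 1 <<< j = 0 := by
      rw [Nat.shiftLeft_eq, one_mul]
      simp [Nat.and_two_pow, hf]
    exact h this
  rw [Nat.shiftLeft_eq, one_mul]
  apply Nat.lt_of_testBit j
  · simp [Nat.testBit_xor, hb]
  · exact hb
  · intro j' hj'
    simp [Nat.testBit_xor, Nat.testBit_two_pow_of_ne (by omega : j ≠ j')]

-- Source B's best(state): memoized recursion over bitmasks; the dict `memo` is threaded through.
mutual
def pvBest (effect : List (List Int)) (n : Int) (k : Nat)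
    (state : Nat) (memo : PySem.Dict Int Int) : PySem.Dict Int Int × Int :=
  if state = 0 then (memo, 0)
  else
    match PySem.Dict.get? memo (state : Int) with
    | some v => (memo, v)
    | none =>
      let r := pvBestLoop effect n k state 0 memo pvInf
      (PySem.Dict.insert r.1 (state : Int) r.2, r.2)
termination_by (state, k + 1)
decreasing_by exact Prod.Lex.right _ (by omega)

def pvBestLoop (effect : List (List Int)) (n : Int) (k : Nat)
    (state : Nat) (j : Nat) (memo : PySem.Dict Int Int) (m : Int) : PySem.Dict Int Int × Int :=
  if j < k then
    if hb : state &&& (1 <<< j) = 0 then pvBestLoop effect n k state (j + 1) memo m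
    else
      let r := pvBest effect n k (state ^^^ (1 <<< j)) memo
      let m := if r.2 < n then
          min m (PySem.List.pyGetD (PySem.List.pyGetD effect (j : Int) []) r.2 pvInf)
        else m
      pvBestLoop effect n k state (j + 1) r.1 m
  else (memo, m)
termination_by (state, k - j)
decreasing_by
  · exact Prod.Lex.right _ (by omega)
  · exact Prod.Lex.left _ _ (pvXorLt state j hb)
  · exact Prod.Lex.right _ (by omega)
end

def judgeB (n : Int) (k : Int) (s : String) (needed : Int) : Bool :=
  -- Source B builds `effect` with an append loop
  let effect : List (List Int) :=
    (PySem.List.pyRange 0 k 1).foldl (fun acc j => acc ++ [effectRow n s needed j]) []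
  (pvBest effect n k.toNat (2 ^ k.toNat - 1) PySem.Dict.empty).2 ≤ n

def searchB (n : Int) (k : Int) (s : String) (front : Int) (rear : Int) : Int :=
  if h : front < rear then
    let mid := PySem.Int.floordiv (front + rear) 2
    if judgeB n k s mid then searchB n k s (mid + 1) rear
    else searchB n k s front mid
  else front - 1
termination_by (rear - front).toNat
decreasing_by
  · have h1 : front ≤ PySem.Int.floordiv (front + rear) 2 :=
      (PySem.Int.le_floordiv_iff_mul_le (by omega)).2 (by omega)
    omega
  · have h2 : PySem.Int.floordiv (front + rear) 2 < rear :=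
      (PySem.Int.floordiv_lt_iff_lt_mul (by omega)).2 (by omega)
    have h1 : front ≤ PySem.Int.floordiv (front + rear) 2 :=
      (PySem.Int.le_floordiv_iff_mul_le (by omega)).2 (by omega)
    omega

def solve_alt (n : Int) (k : Int) (s : String) : Int :=
  searchB n k s 0 (PySem.Int.floordiv n k + 1)

-- ===== PRECONDITION & SPEC =====
-- Pre_ excludes exactly the inputs where Python A raises: k = 0 (ZeroDivisionError on n // k);
-- k < 0 with n ≤ 0 (judge runs and 1 << k raises ValueError; for k < 0 with 1 ≤ n the loop
-- body never runs and A returns -1); and 1 ≤ k with len(s) < n (IndexError on s[i]).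
def Pre_solve (n : Int) (k : Int) (s : String) : Prop :=
  (1 ≤ k ∧ n ≤ (s.length : Int)) ∨ (k < 0 ∧ 1 ≤ n)
instance (n : Int) (k : Int) (s : String) : Decidable (Pre_solve n k s) := by
  unfold Pre_solve; infer_instance

def pvWitness_solve : Int × Int × String := (5, 2, "a?b?c")

def Spec_solve (n : Int) (k : Int) (s : String) (out : Int) : Prop := out = solve_alt n k s
instance (n : Int) (k : Int) (s : String) (out : Int) : Decidable (Spec_solve n k s out) := by
  unfold Spec_solve; infer_instance

-- ===== CLAIM (what is proved, stated in full; the proofs are below) =====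
def Claim_equal_solve : Prop := ∀ (n : Int) (k : Int) (s : String),
  Dom_solve n k s → Pre_solve n k s → Spec_solve n k s (solve n k s)

-- ===== LEMMAS AND PROOFS =====

-- pure (memo-free) value of Source B's best(state): the common specification both ports are
-- reduced to.  Same recursion structure as pvBest, no dict.
mutual
def pbBest (effect : List (List Int)) (n : Int) (k : Nat) (state : Nat) : Int :=
  if state = 0 then 0 else pbLoop effect n k state 0 pvInf
termination_by (state, k + 1)
decreasing_by exact Prod.Lex.right _ (by omega)

def pbLoop (effect : List (List Int)) (n : Int) (k : Nat) (state : Nat) (j : Nat) (m : Int) : Int :=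
  if j < k then
    if hb : state &&& (1 <<< j) = 0 then pbLoop effect n k state (j + 1) m
    else
      let sub := pbBest effect n k (state ^^^ (1 <<< j))
      pbLoop effect n k state (j + 1)
        (if sub < n then
          min m (PySem.List.pyGetD (PySem.List.pyGetD effect (j : Int) []) sub pvInf)
        else m)
  else m
termination_by (state, k - j)
decreasing_by
  · exact Prod.Lex.right _ (by omega)
  · exact Prod.Lex.left _ _ (pvXorLt state j hb)
  · exact Prod.Lex.right _ (by omega)
end

-- memo correctness invariant
def MemoSound (effect : List (List Int)) (n : Int) (k : Nat) (memo : PySem.Dict Int Int) : Prop :=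
  ∀ (i v : Int), PySem.Dict.get? memo i = some v → 0 ≤ i ∧ v = pbBest effect n k i.toNat


-- unfolding lemmas for the pure recursion (used by all equivalence proofs below)
theorem pbBest_zero {e : List (List Int)} {n : Int} {k : Nat} : pbBest e n k 0 = 0 := by
  rw [pbBest.eq_def]; simp

theorem pbBest_pos {e : List (List Int)} {n : Int} {k st : Nat} (h : st ≠ 0) :
    pbBest e n k st = pbLoop e n k st 0 pvInf := by
  rw [pbBest.eq_def]; simp [h]

theorem pbLoop_ge {e : List (List Int)} {n : Int} {k st j : Nat} {m : Int} (h : ¬ j < k) :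
    pbLoop e n k st j m = m := by
  rw [pbLoop.eq_def]; simp [h]

theorem pbLoop_skip {e : List (List Int)} {n : Int} {k st j : Nat} {m : Int}
    (hjk : j < k) (hb : st &&& (1 <<< j) = 0) :
    pbLoop e n k st j m = pbLoop e n k st (j + 1) m := by
  rw [pbLoop.eq_def]; simp [hjk, hb]

theorem pbLoop_hit {e : List (List Int)} {n : Int} {k st j : Nat} {m : Int}
    (hjk : j < k) (hb : ¬ st &&& (1 <<< j) = 0) :
    pbLoop e n k st j m = pbLoop e n k st (j + 1)
      (if pbBest e n k (st ^^^ (1 <<< j)) < n then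
        min m (PySem.List.pyGetD (PySem.List.pyGetD e (j : Int) []) (pbBest e n k (st ^^^ (1 <<< j))) pvInf)
      else m) := by
  rw [pbLoop.eq_def]; simp only [if_pos hjk, dif_neg hb]

theorem pv_pb_combined (effect : List (List Int)) (n : Int) (k : Nat) :
    ∀ state : Nat,
      (∀ (j : Nat) (memo : PySem.Dict Int Int) (m : Int), MemoSound effect n k memo →
        (pvBestLoop effect n k state j memo m).2 = pbLoop effect n k state j m ∧
        MemoSound effect n k (pvBestLoop effect n k state j memo m).1) ∧
      (∀ memo : PySem.Dict Int Int, MemoSound effect n k memo →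
        (pvBest effect n k state memo).2 = pbBest effect n k state ∧
        MemoSound effect n k (pvBest effect n k state memo).1) := by
  intro state
  induction state using Nat.strong_induction_on with
  | _ state ih =>
    have hloop : ∀ (d j : Nat) (memo : PySem.Dict Int Int) (m : Int), k - j ≤ d →
        MemoSound effect n k memo →
        (pvBestLoop effect n k state j memo m).2 = pbLoop effect n k state j m ∧
        MemoSound effect n k (pvBestLoop effect n k state j memo m).1 := by
      intro d
      induction d with
      | zero =>
        intro j memo m hd hs
        have hjk : ¬ j < k := by omega
        rw [pvBestLoop.eq_def, pbLoop_ge hjk]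
        simp only [if_neg hjk]
        exact ⟨trivial, hs⟩
      | succ d ihd =>
        intro j memo m hd hs
        by_cases hjk : j < k
        · by_cases hb : state &&& (1 <<< j) = 0
          · rw [pvBestLoop.eq_def, pbLoop_skip hjk hb]
            simp only [if_pos hjk, dif_pos hb]
            exact ihd (j+1) memo m (by omega) hs
          · rw [pvBestLoop.eq_def, pbLoop_hit hjk hb]
            simp only [if_pos hjk, dif_neg hb]
            obtain ⟨hv, hsnd⟩ := (ih _ (pvXorLt state j hb)).2 memo hs
            rw [hv]
            exact ihd (j+1) _ _ (by omega) hsnd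
        · rw [pvBestLoop.eq_def, pbLoop_ge hjk]
          simp only [if_neg hjk]
          exact ⟨trivial, hs⟩
    refine ⟨fun j memo m hs => hloop k j memo m (by omega) hs, ?_⟩
    intro memo hs
    by_cases h0 : state = 0
    · subst h0
      rw [pvBest.eq_def]
      simp only [if_pos rfl]
      exact ⟨pbBest_zero.symm, hs⟩
    · rw [pvBest.eq_def]
      simp only [if_neg h0]
      cases hval : PySem.Dict.get? memo (state : Int) with
      | some v =>
        simp only [hval]
        obtain ⟨hge, hv⟩ := hs _ _ hval
        refine ⟨?_, hs⟩
        simpa using hv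
      | none =>
        simp only [hval]
        obtain ⟨hv, hsnd⟩ := hloop k 0 memo pvInf (by omega) hs
        refine ⟨?_, ?_⟩
        · simpa [pbBest_pos h0] using hv
        · intro i v hget
          rw [PySem.Dict.get?_insert] at hget
          by_cases his : i = (state : Int)
          · rw [if_pos his] at hget
            have hv2 : (pvBestLoop effect n k state 0 memo pvInf).2 = v := by
              simpa using hget
            subst his
            refine ⟨by exact_mod_cast Nat.zero_le _, ?_⟩
            rw [Int.toNat_natCast, ← hv2, hv, pbBest_pos h0]
          · rw [if_neg his] at hget
            exact hsnd _ _ hget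

theorem pvBest_eq_pb (effect : List (List Int)) (n : Int) (k : Nat)
    (state : Nat) (memo : PySem.Dict Int Int) (hs : MemoSound effect n k memo) :
    (pvBest effect n k state memo).2 = pbBest effect n k state ∧
      MemoSound effect n k (pvBest effect n k state memo).1 :=
  (pv_pb_combined effect n k state).2 memo hs

-- the inner DP loop of A computes pbLoop, provided ms already holds correct values
theorem inner_fold_eq (eff : List (List Int)) (n : Int) (k : Int) (ms : List Int) (t : Nat)
    (hread : ∀ jn : Nat, jn < k.toNat → t &&& (1 <<< jn) ≠ 0 →
      PySem.List.pyGetD ms (((t ^^^ (1 <<< jn) : Nat) : Int)) pvInf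
        = pbBest eff n k.toNat (t ^^^ (1 <<< jn))) :
    ∀ (d jn : Nat) (m : Int), k.toNat - jn ≤ d →
      (PySem.List.pyRange (jn : Int) k 1).foldl (dpInner eff n ms (t : Int)) m
        = pbLoop eff n k.toNat t jn m := by
  intro d
  induction d with
  | zero =>
    intro jn m hd
    have hjk : ¬ jn < k.toNat := by omega
    rw [PySem.List.pyRange_one_eq_nil (by omega : k ≤ (jn : Int)), pbLoop_ge hjk]
    rfl
  | succ d ihd =>
    intro jn m hd
    by_cases hjk : jn < k.toNat
    · rw [PySem.List.pyRange_one_cons (by omega : (jn : Int) < k), List.foldl_cons]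
      have hcast : ((jn : Int) + 1) = ((jn + 1 : Nat) : Int) := by push_cast; ring
      by_cases hb : t &&& (1 <<< jn) = 0
      · have hg : (1 <<< ((jn : Int)).toNat) &&& ((t : Int)).toNat = 0 := by
          simpa [Nat.and_comm] using hb
        have hstep : dpInner eff n ms (t : Int) m (jn : Int) = m := by
          unfold dpInner; rw [if_pos hg]
        rw [hstep, pbLoop_skip hjk hb, hcast]
        exact ihd (jn + 1) m (by omega)
      · have hg : ¬ ((1 <<< ((jn : Int)).toNat) &&& ((t : Int)).toNat = 0) := by
          simpa [Nat.and_comm] using hb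
        have hstep : dpInner eff n ms (t : Int) m (jn : Int) =
            (if pbBest eff n k.toNat (t ^^^ (1 <<< jn)) < n then
              min m (PySem.List.pyGetD (PySem.List.pyGetD eff ((jn : Int)) [])
                (pbBest eff n k.toNat (t ^^^ (1 <<< jn))) pvInf)
            else m) := by
          unfold dpInner
          rw [if_neg hg]
          simp only [Int.toNat_natCast]
          rw [hread jn hjk hb]
        rw [hstep, pbLoop_hit hjk hb, hcast]
        exact ihd (jn + 1) _ (by omega)
    · rw [PySem.List.pyRange_one_eq_nil (by omega : k ≤ (jn : Int)), pbLoop_ge hjk]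
      rfl

-- invariant of A's ascending DP fold: every processed entry holds pbBest
theorem dp_inv (eff : List (List Int)) (n : Int) (k : Int) :
    ∀ t : Nat, t ≤ 2 ^ k.toNat →
      ((PySem.List.pyRange 1 (t : Int) 1).foldl (dpStep eff n k)
          (PySem.List.pySetD (List.replicate (2 ^ k.toNat) pvInf) 0 0)).length = 2 ^ k.toNat ∧
      ∀ s : Nat, s < 2 ^ k.toNat →
        PySem.List.pyGetD ((PySem.List.pyRange 1 (t : Int) 1).foldl (dpStep eff n k)
            (PySem.List.pySetD (List.replicate (2 ^ k.toNat) pvInf) 0 0)) (s : Int) pvInf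
          = if s < t ∨ s = 0 then pbBest eff n k.toNat s else pvInf := by
  have hms0len : (PySem.List.pySetD (List.replicate (2 ^ k.toNat) pvInf) (0 : Int) 0).length
      = 2 ^ k.toNat := by
    rw [PySem.List.pySetD_of_nonneg _ _ (by omega)]
    simp
  have hms0get : ∀ s : Nat, s < 2 ^ k.toNat →
      PySem.List.pyGetD (PySem.List.pySetD (List.replicate (2 ^ k.toNat) pvInf) (0 : Int) 0)
          (s : Int) pvInf = if s = 0 then 0 else pvInf := by
    intro s hslt
    rw [PySem.List.pySetD_of_nonneg _ _ (by omega), PySem.List.pyGetD_natCast]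
    by_cases h0 : s = 0
    · subst h0
      simp [List.getD, List.getElem?_set, hslt]
    · simp [List.getD, List.getElem?_set, List.getElem?_replicate, hslt, h0, Ne.symm h0]
  intro t
  induction t with
  | zero =>
    intro _
    rw [PySem.List.pyRange_one_eq_nil (by norm_num)]
    refine ⟨hms0len, fun s hs => ?_⟩
    rw [List.foldl_nil, hms0get s hs]
    by_cases h0 : s = 0
    · subst h0; simp [pbBest_zero]
    · simp [h0, show ¬ (s < 0 ∨ s = 0) from by omega]
  | succ t iht =>
    intro hle
    rcases Nat.eq_zero_or_pos t with rfl | htpos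
    · have h01 : ((0 + 1 : Nat) : Int) = 1 := by simp
      rw [h01, PySem.List.pyRange_one_eq_nil (by norm_num : (1:Int) ≤ 1)]
      refine ⟨hms0len, fun s hs => ?_⟩
      rw [List.foldl_nil, hms0get s hs]
      by_cases h0 : s = 0
      · subst h0; simp [pbBest_zero]
      · simp [h0, show ¬ (s < 0 + 1 ∨ s = 0) from by omega]
    · obtain ⟨hlen, hget⟩ := iht (by omega)
      have hcast : ((t + 1 : Nat) : Int) = (t : Int) + 1 := by push_cast; ring
      rw [hcast, PySem.List.pyRange_one_succ_right (by omega : (1:Int) ≤ (t:Int)),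
        List.foldl_append, List.foldl_cons, List.foldl_nil]
      set P := (PySem.List.pyRange 1 (t : Int) 1).foldl (dpStep eff n k)
        (PySem.List.pySetD (List.replicate (2 ^ k.toNat) pvInf) 0 0) with hP
      have htsz : t < 2 ^ k.toNat := by omega
      have hstart : PySem.List.pyGetD P (t : Int) pvInf = pvInf := by
        rw [hget t htsz, if_neg (by omega : ¬ (t < t ∨ t = 0))]
      have hread : ∀ jn : Nat, jn < k.toNat → t &&& (1 <<< jn) ≠ 0 →
          PySem.List.pyGetD P (((t ^^^ (1 <<< jn) : Nat) : Int)) pvInf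
            = pbBest eff n k.toNat (t ^^^ (1 <<< jn)) := by
        intro jn hjn hb
        have hlt := pvXorLt t jn hb
        rw [hget _ (by omega)]
        rw [if_pos (Or.inl hlt)]
      have hinner : dpStep eff n k P (t : Int)
          = PySem.List.pySetD P (t : Int) (pbLoop eff n k.toNat t 0 pvInf) := by
        unfold dpStep
        rw [hstart]
        have h0 := inner_fold_eq eff n k P t hread k.toNat 0 pvInf (by omega)
        rw [show ((0 : Nat) : Int) = 0 from rfl] at h0
        rw [h0]
      rw [hinner]
      constructor
      · rw [PySem.List.pySetD_of_nonneg _ _ (by omega)]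
        simpa using hlen
      · intro s hs
        rw [PySem.List.pyGetD_pySetD_natCast P t s _ _ (by omega)]
        by_cases hst : s = t
        · subst hst
          rw [if_pos rfl, if_pos (by omega), pbBest_pos (by omega)]
        · rw [if_neg hst, hget s hs]
          by_cases hc : s < t ∨ s = 0
          · rw [if_pos hc, if_pos (by omega)]
          · rw [if_neg hc, if_neg (by omega)]

theorem judge_eq (n : Int) (k : Int) (s : String) (needed : Int) :
    judgeA n k s needed = judgeB n k s needed := by
  simp only [judgeA, judgeB]
  rw [PySem.List.foldl_append_singleton_eq_map, List.nil_append]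
  have hpos : 0 < 2 ^ k.toNat := pow_pos (by norm_num) _
  obtain ⟨hlen, hget⟩ := dp_inv ((PySem.List.pyRange 0 k 1).map (fun j => effectRow n s needed j))
      n k (2 ^ k.toNat) (le_refl _)
  set eff := (PySem.List.pyRange 0 k 1).map (fun j => effectRow n s needed j) with heff
  set P := (PySem.List.pyRange 1 ((2 ^ k.toNat : Nat) : Int) 1).foldl (dpStep eff n k)
      (PySem.List.pySetD (List.replicate (2 ^ k.toNat) pvInf) 0 0) with hP
  have hne : P ≠ [] := by
    intro h
    rw [h] at hlen
    simp at hlen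
    omega
  have hlast : PySem.List.pyGetD P (-1) pvInf = pbBest eff n k.toNat (2 ^ k.toNat - 1) := by
    rw [PySem.List.pyGetD_neg_one _ _ hne]
    have h2 : PySem.List.pyGetD P (((2 ^ k.toNat - 1 : Nat) : Int)) pvInf
        = pbBest eff n k.toNat (2 ^ k.toNat - 1) := by
      rw [hget _ (by omega), if_pos (by omega)]
    rw [PySem.List.pyGetD_natCast] at h2
    rw [List.getD_eq_getElem _ _ (by omega : 2 ^ k.toNat - 1 < P.length)] at h2
    rw [List.getLast_eq_getElem hne, ← h2]
    congr 1
    omega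
  rw [hlast]
  obtain ⟨hv, _⟩ := pvBest_eq_pb eff n k.toNat (2 ^ k.toNat - 1) PySem.Dict.empty
      (by intro i v h; rw [PySem.Dict.get?_empty] at h; cases h)
  rw [hv]

theorem search_eq (n : Int) (k : Int) (s : String) (front rear : Int) :
    searchA n k s front rear = searchB n k s front rear := by
  have main : ∀ (N : Nat) (fr re : Int), (re - fr).toNat ≤ N →
      searchA n k s fr re = searchB n k s fr re := by
    intro N
    induction N with
    | zero =>
      intro fr re h
      rw [searchA.eq_def, searchB.eq_def]
      have hnlt : ¬ fr < re := by omega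
      simp [hnlt]
    | succ N ihN =>
      intro fr re h
      rw [searchA.eq_def, searchB.eq_def]
      by_cases hlt : fr < re
      · simp only [dif_pos hlt]
        have h1 : fr ≤ PySem.Int.floordiv (fr + re) 2 :=
          (PySem.Int.le_floordiv_iff_mul_le (by omega)).2 (by omega)
        have h2 : PySem.Int.floordiv (fr + re) 2 < re :=
          (PySem.Int.floordiv_lt_iff_lt_mul (by omega)).2 (by omega)
        rw [judge_eq]
        by_cases hj : judgeB n k s (PySem.Int.floordiv (fr + re) 2) = true
        · rw [if_pos hj, if_pos hj]
          exact ihN _ _ (by omega)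
        · rw [if_neg hj, if_neg hj]
          exact ihN _ _ (by omega)
      · simp only [dif_neg hlt]
  exact main (rear - front).toNat front rear (le_refl _)

-- ===== VERDICT (by name: the statement is the Claim_ definition above) =====
theorem solve_spec : Claim_equal_solve := by
  intro n k s _ _
  unfold Spec_solve solve solve_alt
  exact search_eq n k s 0 (PySem.Int.floordiv n k + 1)
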